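-- pv_equiv track=rewrite | github.com/zhenyu818/gpuFI-4 | analysis_fault.py | reduce_combo
-- ===== SOURCE A (Python) =====
-- def reduce_combo(combo: str) -> str:
--     """规约 key=val;key=val;... 至稳定字段序，便于去重存档"""
--     keep_order = [
--         "comp",
--         "per_warp",
--         "kernel",
--         "thread",
--         "warp",
--         "block",
--         "cycle",
--         "reg_name",
--         "reg_rand_n",
--     ]
--     kv = {}
--     for part in combo.split(";"):
--         if not part or "=" not in part:
--             continue
--         k, v = part.split("=", 1)
--         k = k.strip()
--         v = v.strip()
--         kv[k] = v
--     return ";".join([f"{k}={kv[k]}" for k in keep_order if k in kv])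
-- ===== SOURCE B (Python) =====
-- def reduce_combo(combo: str) -> str:
--     """Same reduction, but scans the parts once per fixed key (last match wins) instead of building a dict."""
--     parts = combo.split(";")
--     out = []
--     for key in ("comp", "per_warp", "kernel", "thread", "warp", "block",
--                 "cycle", "reg_name", "reg_rand_n"):
--         found = None
--         for part in parts:
--             if not part or "=" not in part:
--                 continue
--             k, v = part.split("=", 1)
--             if k.strip() == key:
--                 found = v.strip()
--         if found is not None:
--             out.append(key + "=" + found)
--     return ";".join(out)
-- ===== Notes on version B (the rewrite author's own statement) =====
-- stated objective: alternative
-- what changed: Replaces the dict-building pass plus comprehension with a scan of the split parts once per fixed key, keeping the last matching value, so no dict is ever built.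
import Mathlib
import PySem

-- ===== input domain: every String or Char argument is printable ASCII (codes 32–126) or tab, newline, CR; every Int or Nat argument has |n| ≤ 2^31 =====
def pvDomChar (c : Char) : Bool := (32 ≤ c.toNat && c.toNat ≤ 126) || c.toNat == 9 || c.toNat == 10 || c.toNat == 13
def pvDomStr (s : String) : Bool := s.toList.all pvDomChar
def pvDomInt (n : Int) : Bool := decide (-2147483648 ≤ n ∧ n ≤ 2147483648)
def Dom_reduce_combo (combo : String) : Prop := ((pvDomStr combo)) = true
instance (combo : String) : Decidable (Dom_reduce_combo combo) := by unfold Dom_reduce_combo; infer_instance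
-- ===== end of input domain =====

-- B re-decomposes A: instead of building a dict in one pass, it scans the split parts once per
-- fixed key (last match wins) and appends found keys in order; same return value, no dict.

-- ===== PORT A =====
-- one dict-building step of A's loop over combo.split(";")
def pvStepA (kv : PySem.Dict String String) (part : String) : PySem.Dict String String :=
  if part == "" || !(PySem.Str.isIn "=" part) then kv
  else match PySem.Str.splitMax? part "=" 1 with
    | some (k :: v :: _) => kv.insert (PySem.Str.strip k) (PySem.Str.strip v)
    | _ => kv

def reduce_combo (combo : String) : String :=
  let keep_order : List String :=
    ["comp", "per_warp", "kernel", "thread", "warp", "block", "cycle", "reg_name", "reg_rand_n"]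
  let kv := ((PySem.Str.split? combo ";").getD []).foldl pvStepA PySem.Dict.empty
  PySem.Str.join ";"
    ((keep_order.filter (fun k => kv.contains k)).map (fun k => k ++ "=" ++ (kv.get? k).getD ""))

-- ===== PORT B =====
-- B's inner loop body: update the last value found for `key` with this part
def pvScanStep (key : String) (found : Option String) (part : String) : Option String :=
  if part == "" || !(PySem.Str.isIn "=" part) then found
  else match PySem.Str.splitMax? part "=" 1 with
    | some (k :: v :: _) =>
        if PySem.Str.strip k == key then some (PySem.Str.strip v) else found
    | _ => found

def reduce_combo_alt (combo : String) : String :=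
  let parts := (PySem.Str.split? combo ";").getD []
  let out := (["comp", "per_warp", "kernel", "thread", "warp", "block", "cycle",
               "reg_name", "reg_rand_n"] : List String).foldl
    (fun out key =>
      match parts.foldl (pvScanStep key) none with
      | some v => out ++ [key ++ "=" ++ v]
      | none => out) []
  PySem.Str.join ";" out

-- ===== PRECONDITION & SPEC =====
def Spec_reduce_combo (combo : String) (out : String) : Prop := out = reduce_combo_alt combo
instance (combo : String) (out : String) : Decidable (Spec_reduce_combo combo out) := by
  unfold Spec_reduce_combo; infer_instance

-- ===== CLAIM (what is proved, stated in full; the proofs are below) =====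
def Claim_equal_reduce_combo : Prop :=
  ∀ (combo : String), Dom_reduce_combo combo → Spec_reduce_combo combo (reduce_combo combo)

-- ===== LEMMAS AND PROOFS =====

-- one step: the dict lookup after one A-step is one B-scan step on the lookup
lemma step_get (d : PySem.Dict String String) (part key : String) :
    (pvStepA d part).get? key = pvScanStep key (d.get? key) part := by
  unfold pvStepA pvScanStep
  split_ifs with h
  · rfl
  · cases hs : PySem.Str.splitMax? part "=" 1 with
    | none => rfl
    | some l =>
      match l with
      | [] => rfl
      | [_] => rfl
      | k :: v :: rest =>
        simp only
        by_cases hk : PySem.Str.strip k == key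
        · simp [PySem.Dict.get?_insert_self, (beq_iff_eq.mp hk)]
        · rw [PySem.Dict.get?_insert_of_ne]
          · simp [hk]
          · exact fun h' => (by simp [h'] at hk)

-- fold version: dict lookup after A's whole loop equals B's scan started from the lookup
lemma fold_get (parts : List String) (d : PySem.Dict String String) (key : String) :
    (parts.foldl pvStepA d).get? key = parts.foldl (pvScanStep key) (d.get? key) := by
  induction parts generalizing d with
  | nil => rfl
  | cons p ps ih => simp only [List.foldl_cons]; rw [ih, step_get]

-- B's outer loop over the keys builds exactly A's filtered comprehension
lemma out_list (kv : PySem.Dict String String) (parts : List String)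
    (hkv : ∀ key, kv.get? key = parts.foldl (pvScanStep key) none)
    (keep : List String) (acc : List String) :
    keep.foldl
      (fun out key =>
        match parts.foldl (pvScanStep key) none with
        | some v => out ++ [key ++ "=" ++ v]
        | none => out) acc
    = acc ++ (keep.filter (fun k => kv.contains k)).map
        (fun k => k ++ "=" ++ (kv.get? k).getD "") := by
  induction keep generalizing acc with
  | nil => simp
  | cons k ks ih =>
    simp only [List.foldl_cons, List.filter_cons]
    have hc : kv.contains k = (kv.get? k).isSome := PySem.Dict.contains_eq_isSome_get? kv k
    cases h : parts.foldl (pvScanStep k) none with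
    | none =>
      have : kv.contains k = false := by rw [hc, hkv k, h]; rfl
      simp [this, ih]
    | some v =>
      have : kv.contains k = true := by rw [hc, hkv k, h]; rfl
      simp [this, ih, hkv k, h]

-- ===== VERDICT (by name: the statement is the Claim_ definition above) =====
theorem reduce_combo_spec : Claim_equal_reduce_combo := by
  intro combo _
  unfold Spec_reduce_combo reduce_combo reduce_combo_alt
  have hkv : ∀ key,
      (((PySem.Str.split? combo ";").getD []).foldl pvStepA PySem.Dict.empty).get? key
        = ((PySem.Str.split? combo ";").getD []).foldl (pvScanStep key) none := by
    intro key
    rw [fold_get]; rfl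
  simp only [out_list _ _ hkv, List.nil_append]
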